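-- pv_equiv track=rewrite | github.com/AdamZhouSE/pythonHomework | Code/CodeRecords/2951/60677/257806.py | trans2
-- ===== SOURCE A (Python) =====
-- def trans2(num):
--     num=list(str(num))
--     num.reverse()
--     n=num.__len__()
--     answer=0
--     for i in range(n):
--         answer+=int(num[i])*(2**i)
--     return answer
-- ===== SOURCE B (Python) =====
-- def trans2(num):
--     answer = 0
--     for d in str(num):
--         answer = answer * 2 + int(d)
--     return answer
-- ===== Notes on version B (the rewrite author's own statement) =====
-- stated objective: simpler
-- what changed: Replaced the reverse-then-power summation (per-digit power-of-two multiplied into a running sum over the reversed digit string) with a single left-to-right Horner pass (answer doubled plus next digit), removing the reversal, the length variable and all exponentiation.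
import Mathlib
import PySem

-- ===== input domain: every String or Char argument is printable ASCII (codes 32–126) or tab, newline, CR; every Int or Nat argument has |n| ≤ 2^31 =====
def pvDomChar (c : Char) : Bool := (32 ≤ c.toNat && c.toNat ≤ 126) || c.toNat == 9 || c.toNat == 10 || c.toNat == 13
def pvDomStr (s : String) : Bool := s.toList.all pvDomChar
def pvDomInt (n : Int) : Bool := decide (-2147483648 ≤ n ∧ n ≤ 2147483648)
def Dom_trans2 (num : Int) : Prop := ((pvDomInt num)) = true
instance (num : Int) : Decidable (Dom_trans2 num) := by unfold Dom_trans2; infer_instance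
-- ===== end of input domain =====

-- B replaces A's reverse + per-digit power-of-two summation with a single Horner pass (simpler; same cost class).

-- int(c) for one character; Python raises ValueError on a non-digit — Pre_ excludes those inputs (negative num)
def pvDigitVal (c : Char) : Int := (PySem.Int.ofChars? [c]).getD 0

-- ===== PORT A =====
def trans2 (num : Int) : Int :=
  let numL := (PySem.Int.toChars num).reverse
  let n : Int := numL.length
  (PySem.List.pyRange 0 n 1).foldl
    (fun answer i => answer + pvDigitVal (PySem.List.pyGetD numL i ' ') * 2 ^ i.toNat) 0

-- ===== PORT B =====
def trans2_alt (num : Int) : Int :=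
  (PySem.Int.toChars num).foldl (fun answer d => answer * 2 + pvDigitVal d) 0

-- ===== PRECONDITION & SPEC =====
-- A raises ValueError on negative num: int('-') fails on the sign character; B raises identically, Pre_ excludes those inputs.
def Pre_trans2 (num : Int) : Prop := 0 ≤ num
instance (num : Int) : Decidable (Pre_trans2 num) := by unfold Pre_trans2; infer_instance
def pvWitness_trans2 : Int := 101
def Spec_trans2 (num : Int) (out : Int) : Prop := out = trans2_alt num
instance (num : Int) (out : Int) : Decidable (Spec_trans2 num out) := by unfold Spec_trans2; infer_instance

-- ===== CLAIM (what is proved, stated in full; the proofs are below) =====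
def Claim_equal_trans2 : Prop := ∀ (num : Int), Dom_trans2 num → Pre_trans2 num → Spec_trans2 num (trans2 num)

-- ===== LEMMAS AND PROOFS =====

-- little-endian binary value of a digit list: evalRev (d :: t) = d + 2 * evalRev t
def evalRev : List Int → Int
  | [] => 0
  | d :: t => d + 2 * evalRev t

theorem evalRev_append_singleton (r : List Int) (d : Int) :
    evalRev (r ++ [d]) = evalRev r + d * 2 ^ r.length := by
  induction r with
  | nil => simp [evalRev]
  | cons x t ih => simp [evalRev, ih, List.length_cons]; ring

-- A's loop over range(n) with powers computes evalRev of the (mapped) list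
theorem lemA (cs : List Char) :
    (PySem.List.pyRange 0 cs.length 1).foldl
      (fun answer i => answer + pvDigitVal (PySem.List.pyGetD cs i ' ') * 2 ^ i.toNat) 0
    = evalRev (cs.map pvDigitVal) := by
  induction cs using List.reverseRecOn with
  | nil => simp [PySem.List.pyRange_one_eq_nil, evalRev]
  | append_singleton t d ih =>
    have h1 : ((t ++ [d]).length : Int) = (t.length : Int) + 1 := by simp
    rw [h1, PySem.List.pyRange_one_succ_right (by exact_mod_cast Int.natCast_nonneg t.length),
        List.foldl_append]
    have hcong :
        (PySem.List.pyRange 0 t.length 1).foldl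
          (fun answer i => answer + pvDigitVal (PySem.List.pyGetD (t ++ [d]) i ' ') * 2 ^ i.toNat) 0
        = (PySem.List.pyRange 0 t.length 1).foldl
            (fun answer i => answer + pvDigitVal (PySem.List.pyGetD t i ' ') * 2 ^ i.toNat) 0 := by
      apply PySem.List.foldl_congr_mem
      intro a i hi
      have hmem := (PySem.List.mem_pyRange_one).mp hi
      have h2 : PySem.List.pyGetD (t ++ [d]) i ' ' = PySem.List.pyGetD t i ' ' := by
        obtain ⟨h0, hlt⟩ := hmem
        rw [PySem.List.pyGetD_eq_getElem (t ++ [d]) ' ' h0 (by simp; omega),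
            PySem.List.pyGetD_eq_getElem t ' ' h0 hlt,
            List.getElem_append_left]
      rw [h2]
    rw [hcong, ih]
    simp only [List.foldl_cons, List.foldl_nil]
    rw [PySem.List.pyGetD_natCast]
    simp [List.map_append, evalRev_append_singleton]

-- B's Horner fold computes evalRev of the reversed (mapped) list
theorem lemB (l : List Int) (acc : Int) :
    l.foldl (fun answer d => answer * 2 + d) acc
    = acc * 2 ^ l.length + evalRev l.reverse := by
  induction l generalizing acc with
  | nil => simp [evalRev]
  | cons x t ih =>
    simp only [List.foldl_cons, ih, List.reverse_cons, evalRev_append_singleton,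
      List.length_reverse, List.length_cons]
    ring

-- ===== VERDICT (by name: the statement is the Claim_ definition above) =====
theorem trans2_spec : Claim_equal_trans2 := by
  intro num _ _
  unfold Spec_trans2
  have hB : trans2_alt num
      = evalRev (((PySem.Int.toChars num).map pvDigitVal).reverse) := by
    unfold trans2_alt
    rw [← List.foldl_map, lemB]
    simp
  have hA : trans2 num
      = evalRev (((PySem.Int.toChars num).reverse).map pvDigitVal) := by
    unfold trans2
    simpa using lemA (PySem.Int.toChars num).reverse
  rw [hA, hB, List.map_reverse]
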